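-- pv_equiv track=rewrite | github.com/suamin/PyNemex | nemex/utils.py | tokens_to_whitespace_char_spans
-- ===== SOURCE A (Python) =====
-- from typing import List, Tuple
--
-- def tokens_to_whitespace_char_spans(tokens: list) -> List[Tuple[int, int]]:
--     """TODO: Documentation
--
--     Parameters
--     ----------
--     tokens: list
--         Tokens.
--
--     Returns
--     -------
--     TODO: Documentation
--
--     """
--
--     i = 0
--
--     # list of tuple of (start_char_index, end_char_index) in " ".join(tokens)
--     spans = list()
--     for t in tokens:
--         start = i
--         end = i + len(t)
--         spans.append((start, end))
--
--         # +1 for whitespace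
--         i = end + 1
--
--     return spans
-- ===== SOURCE B (Python) =====
-- def tokens_to_whitespace_char_spans(tokens: list):
--     # Divide and conquer: spans of the whole list = spans of the left half,
--     # followed by spans of the right half shifted by the left half's joined
--     # width (+1 for the separating whitespace).  No running offset anywhere.
--     if not tokens:
--         return []
--     if len(tokens) == 1:
--         return [(0, len(tokens[0]))]
--     m = len(tokens) // 2
--     left = tokens_to_whitespace_char_spans(tokens[:m])
--     right = tokens_to_whitespace_char_spans(tokens[m:])
--     w = left[-1][1] + 1
--     return left + [(a + w, b + w) for a, b in right]
-- ===== Notes on version B (the rewrite author's own statement) =====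
-- stated objective: alternative
-- what changed: B is a divide-and-conquer recursion: it computes the span lists of the two halves independently (each relative to origin 0) and merges by shifting the right half's spans by the left half's joined width plus one, instead of A's single forward loop threading a running offset.
import Mathlib
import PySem

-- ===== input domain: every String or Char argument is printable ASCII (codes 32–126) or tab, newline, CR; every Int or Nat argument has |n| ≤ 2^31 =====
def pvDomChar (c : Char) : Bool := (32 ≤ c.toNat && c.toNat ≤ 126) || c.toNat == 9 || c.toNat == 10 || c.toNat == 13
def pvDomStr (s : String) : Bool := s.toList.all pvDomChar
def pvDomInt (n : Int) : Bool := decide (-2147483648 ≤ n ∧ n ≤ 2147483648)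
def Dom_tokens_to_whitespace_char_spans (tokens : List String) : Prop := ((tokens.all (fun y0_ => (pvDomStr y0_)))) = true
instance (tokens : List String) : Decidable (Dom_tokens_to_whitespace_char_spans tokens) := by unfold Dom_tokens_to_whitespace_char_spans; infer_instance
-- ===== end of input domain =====

-- B replaces A's running-offset loop by a divide-and-conquer recursion (halves computed
-- independently at origin 0, right half shifted by the left's joined width) — alternative decomposition.


-- ===== PORT A =====
-- A: one forward loop threading a running offset i, appending (i, i+len t), then i := end+1.
def tokens_to_whitespace_char_spans (tokens : List String) : List (Int × Int) :=
  (tokens.foldl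
    (fun (st : Int × List (Int × Int)) t =>
      let start := st.1
      let stop := st.1 + PySem.Str.len t
      (stop + 1, st.2 ++ [(start, stop)]))
    (0, [])).2

-- ===== PORT B =====
-- B: divide and conquer on the half split; tokens[:m]/tokens[m:] ported as take/drop (m = len//2,
-- in range, so exact).  Python's left[-1] is ported as getLastD: left is provably nonempty (m ≥ 1).
def tokens_to_whitespace_char_spans_alt : List String → List (Int × Int)
  | [] => []
  | [t] => [(0, PySem.Str.len t)]
  | t1 :: t2 :: rest =>
      let ts := t1 :: t2 :: rest
      let m := ts.length / 2
      let left := tokens_to_whitespace_char_spans_alt (ts.take m)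
      let right := tokens_to_whitespace_char_spans_alt (ts.drop m)
      let w := (left.getLastD (0, 0)).2 + 1
      left ++ right.map (fun p => (p.1 + w, p.2 + w))
termination_by ts => ts.length
decreasing_by all_goals simp; omega

-- ===== PRECONDITION & SPEC =====
def Spec_tokens_to_whitespace_char_spans (tokens : List String) (out : List (Int × Int)) : Prop := out = tokens_to_whitespace_char_spans_alt tokens
instance (tokens : List String) (out : List (Int × Int)) : Decidable (Spec_tokens_to_whitespace_char_spans tokens out) := by unfold Spec_tokens_to_whitespace_char_spans; infer_instance

-- ===== CLAIM (what is proved, stated in full; the proofs are below) =====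
def Claim_equal_tokens_to_whitespace_char_spans : Prop := ∀ (tokens : List String), Dom_tokens_to_whitespace_char_spans tokens → Spec_tokens_to_whitespace_char_spans tokens (tokens_to_whitespace_char_spans tokens)

-- ===== LEMMAS AND PROOFS =====
-- Canonical structural form of the spans (proof-only bridge between the two ports).
def pvSpans : List String → List (Int × Int)
  | [] => []
  | t :: ts => (0, PySem.Str.len t) :: (pvSpans ts).map
      (fun p => (p.1 + PySem.Str.len t + 1, p.2 + PySem.Str.len t + 1))

-- joined width of the tokens, plus the trailing separator
def pvW (ts : List String) : Int := (ts.map (fun t => PySem.Str.len t + 1)).sum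

theorem pvSpans_append (xs ys : List String) :
    pvSpans (xs ++ ys)
      = pvSpans xs ++ (pvSpans ys).map (fun p => (p.1 + pvW xs, p.2 + pvW xs)) := by
  induction xs with
  | nil => simp [pvSpans, pvW]
  | cons t xs ih =>
      simp only [List.cons_append, pvSpans, ih, List.map_append, List.map_map, pvW,
        List.map_cons, List.sum_cons]
      congr 1
      congr 1
      refine List.map_congr_left ?_
      intro p _
      simp only [Function.comp, Prod.ext_iff]
      constructor <;> ring

theorem pvSpans_last (xs : List String) (h : xs ≠ []) :
    ((pvSpans xs).getLastD (0, 0)).2 = pvW xs - 1 := by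
  induction xs with
  | nil => simp at h
  | cons t xs ih =>
      cases xs with
      | nil => simp [pvSpans, pvW]
      | cons u us =>
          have hne : pvSpans (u :: us) ≠ [] := by simp [pvSpans]
          obtain ⟨q, hq⟩ : ∃ q, (pvSpans (u :: us)).getLast? = some q :=
            Option.isSome_iff_exists.mp (List.getLast?_isSome.mpr hne)
          have hq2 : q.2 = pvW (u :: us) - 1 := by
            have := ih (by simp)
            rw [List.getLastD_eq_getLast?, hq] at this
            simpa using this
          have hexp : pvSpans (t :: u :: us)
              = (0, PySem.Str.len t) :: (pvSpans (u :: us)).map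
                  (fun p => (p.1 + PySem.Str.len t + 1, p.2 + PySem.Str.len t + 1)) := rfl
          rw [hexp, List.getLastD_eq_getLast?, List.getLast?_cons, List.getLast?_map, hq]
          simp only [Option.map_some, Option.getD_some]
          simp only [pvW, List.map_cons, List.sum_cons] at hq2 ⊢
          linear_combination hq2

theorem alt_eq_pvSpans (ts : List String) :
    tokens_to_whitespace_char_spans_alt ts = pvSpans ts := by
  induction ts using tokens_to_whitespace_char_spans_alt.induct with
  | case1 => simp [tokens_to_whitespace_char_spans_alt, pvSpans]
  | case2 t => simp [tokens_to_whitespace_char_spans_alt, pvSpans]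
  | case3 t1 t2 rest ts m ihl ihr =>
      rw [tokens_to_whitespace_char_spans_alt]
      rw [ihl, ihr]
      have hsplit : (t1 :: t2 :: rest).take ((t1 :: t2 :: rest).length / 2)
          ++ (t1 :: t2 :: rest).drop ((t1 :: t2 :: rest).length / 2) = t1 :: t2 :: rest :=
        List.take_append_drop _ _
      have hne : (t1 :: t2 :: rest).take ((t1 :: t2 :: rest).length / 2) ≠ [] := by
        intro hcontra
        have := congrArg List.length hcontra
        simp at this
      rw [pvSpans_last _ hne]
      rw [pvW]
      conv_rhs => rw [← hsplit, pvSpans_append]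
      congr 1
      refine List.map_congr_left ?_
      intro p _
      simp only [Prod.ext_iff, pvW]
      constructor <;> ring

-- Loop invariant for A: the fold started at offset i with accumulator acc yields acc
-- followed by the origin-0 spans of the remaining tokens shifted by i.
theorem pv_loop_eq (ts : List String) (i : Int) (acc : List (Int × Int)) :
    (ts.foldl
      (fun (st : Int × List (Int × Int)) t =>
        let start := st.1
        let stop := st.1 + PySem.Str.len t
        (stop + 1, st.2 ++ [(start, stop)]))
      (i, acc)).2
    = acc ++ (pvSpans ts).map (fun p => (p.1 + i, p.2 + i)) := by
  induction ts generalizing i acc with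
  | nil => simp [pvSpans]
  | cons t ts ih =>
      simp only [List.foldl_cons, pvSpans, List.map_cons, List.map_map]
      rw [ih]
      simp only [List.append_assoc, List.singleton_append]
      congr 2
      · simp [Prod.ext_iff]; ring
      refine List.map_congr_left ?_
      intro p _
      simp only [Function.comp, Prod.ext_iff]
      constructor <;> ring

-- ===== VERDICT (by name: the statement is the Claim_ definition above) =====
theorem tokens_to_whitespace_char_spans_spec : Claim_equal_tokens_to_whitespace_char_spans := by
  intro tokens _
  show _ = _
  unfold tokens_to_whitespace_char_spans
  rw [pv_loop_eq, alt_eq_pvSpans]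
  simp
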